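-- pv_equiv track=rewrite | github.com/Cardonagt/-AA-Practica_ArbolDecision_carnet | src/decision_tree.py | clasificar_numeros
-- ===== SOURCE A (Python) =====
-- def clasificar_numeros(numeros, umbral):
--     """
--     Clasifica una lista de números como 'Alto' o 'Bajo' según un umbral[cite: 21, 22].
--
--     El árbol de decisión es de un solo nodo:
--     - Si numero >= umbral -> "Alto" [cite: 30]
--     - Si numero < umbral  -> "Bajo" [cite: 31]
--
--     Args:
--         numeros (list): Lista de enteros a clasificar.
--         umbral (int): El valor de corte para la decisión.
--
--     Returns:
--         tuple: Una tupla conteniendo: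
--             - (list): Lista de resultados (ej: "23 -> Bajo").
--             - (dict): Conteo de "Alto" y "Bajo".
--     """
--     clasificaciones = []
--     conteo = {"Alto": 0, "Bajo": 0}
--
--     for num in numeros:
--         if num >= umbral:
--             clase = "Alto"
--             conteo["Alto"] += 1
--         else:
--             clase = "Bajo"
--             conteo["Bajo"] += 1
--         clasificaciones.append(f"{num} -> {clase}")
--
--     return clasificaciones, conteo
-- ===== SOURCE B (Python) =====
-- def clasificar_numeros(numeros, umbral):
--     clasificaciones = [f"{n} -> {'Alto' if n >= umbral else 'Bajo'}" for n in numeros]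
--     alto = sum(1 for n in numeros if n >= umbral)
--     return clasificaciones, {"Alto": alto, "Bajo": len(numeros) - alto}
-- ===== Notes on version B (the rewrite author's own statement) =====
-- stated objective: simpler
-- what changed: Replaces the fused loop with mutable dict counters by a comprehension for the labels plus a conditional-sum for the 'Alto' count, deriving 'Bajo' arithmetically as len(numeros) - alto.
import Mathlib
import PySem

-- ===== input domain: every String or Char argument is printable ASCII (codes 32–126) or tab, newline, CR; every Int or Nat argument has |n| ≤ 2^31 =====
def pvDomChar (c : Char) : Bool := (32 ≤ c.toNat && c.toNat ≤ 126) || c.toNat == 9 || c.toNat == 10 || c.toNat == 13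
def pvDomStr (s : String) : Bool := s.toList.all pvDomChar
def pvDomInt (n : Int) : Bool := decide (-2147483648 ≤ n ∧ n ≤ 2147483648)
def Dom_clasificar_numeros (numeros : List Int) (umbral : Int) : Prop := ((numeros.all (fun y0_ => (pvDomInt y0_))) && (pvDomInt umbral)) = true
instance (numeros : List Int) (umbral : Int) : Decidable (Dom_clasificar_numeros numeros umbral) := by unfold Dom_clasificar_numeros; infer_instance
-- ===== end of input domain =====

-- B replaces A's fused loop with mutable dict counters by a label comprehension plus a
-- conditional sum for the "Alto" count, deriving "Bajo" as len - alto (objective: simpler).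

-- ===== PORT A =====
-- one fused loop: append the classification string and bump the matching dict counter
def clasificar_numeros (numeros : List Int) (umbral : Int) : List String × (List (String × Int)) :=
  let r := numeros.foldl
    (fun (st : List String × PySem.Dict String Int) num =>
      if umbral ≤ num then
        (st.1 ++ [PySem.Int.toStr num ++ " -> " ++ "Alto"], st.2.modify "Alto" 0 (· + 1))
      else
        (st.1 ++ [PySem.Int.toStr num ++ " -> " ++ "Bajo"], st.2.modify "Bajo" 0 (· + 1)))
    ([], PySem.Dict.ofList [("Alto", 0), ("Bajo", 0)])
  (r.1, r.2.items)

-- ===== PORT B =====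
-- comprehension for the strings, 0/1-sum for alto, bajo = len - alto
def clasificar_numeros_alt (numeros : List Int) (umbral : Int) : List String × (List (String × Int)) :=
  let clasificaciones := numeros.map
    (fun n => PySem.Int.toStr n ++ " -> " ++ (if umbral ≤ n then "Alto" else "Bajo"))
  let alto := (numeros.map (fun n => if umbral ≤ n then (1 : Int) else 0)).sum
  (clasificaciones, [("Alto", alto), ("Bajo", (numeros.length : Int) - alto)])

-- ===== PRECONDITION & SPEC =====
def Spec_clasificar_numeros (numeros : List Int) (umbral : Int) (out : List String × (List (String × Int))) : Prop := out = clasificar_numeros_alt numeros umbral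
instance (numeros : List Int) (umbral : Int) (out : List String × (List (String × Int))) : Decidable (Spec_clasificar_numeros numeros umbral out) := by unfold Spec_clasificar_numeros; infer_instance

-- ===== CLAIM (what is proved, stated in full; the proofs are below) =====
def Claim_equal_clasificar_numeros : Prop := ∀ (numeros : List Int) (umbral : Int), Dom_clasificar_numeros numeros umbral → Spec_clasificar_numeros numeros umbral (clasificar_numeros numeros umbral)

-- ===== LEMMAS AND PROOFS =====

-- A's fold splits into the label list and a modify-count loop over the labels
theorem pv_foldl_split (umbral : Int) (numeros : List Int)
    (acc : List String) (d : PySem.Dict String Int) :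
    numeros.foldl
      (fun (st : List String × PySem.Dict String Int) num =>
        if umbral ≤ num then
          (st.1 ++ [PySem.Int.toStr num ++ " -> " ++ "Alto"], st.2.modify "Alto" 0 (· + 1))
        else
          (st.1 ++ [PySem.Int.toStr num ++ " -> " ++ "Bajo"], st.2.modify "Bajo" 0 (· + 1)))
      (acc, d)
    = (acc ++ numeros.map
         (fun n => PySem.Int.toStr n ++ " -> " ++ (if umbral ≤ n then "Alto" else "Bajo")),
       (numeros.map (fun n => if umbral ≤ n then "Alto" else "Bajo")).foldl
         (fun d x => d.modify x 0 (· + 1)) d) := by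
  induction numeros generalizing acc d with
  | nil => simp
  | cons n rest ih =>
    by_cases h : umbral ≤ n <;> simp [h, ih]

theorem pv_count_alto (umbral : Int) (numeros : List Int) :
    ((numeros.map (fun n => if umbral ≤ n then "Alto" else "Bajo")).count "Alto" : Int)
      = (numeros.map (fun n => if umbral ≤ n then (1 : Int) else 0)).sum := by
  induction numeros with
  | nil => simp
  | cons n rest ih =>
    by_cases h : umbral ≤ n <;>
      simp [h, ← ih] <;> ring

theorem pv_count_bajo (umbral : Int) (numeros : List Int) :
    ((numeros.map (fun n => if umbral ≤ n then "Alto" else "Bajo")).count "Bajo" : Int)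
      = (numeros.length : Int)
        - (numeros.map (fun n => if umbral ≤ n then (1 : Int) else 0)).sum := by
  induction numeros with
  | nil => simp
  | cons n rest ih =>
    by_cases h : umbral ≤ n <;>
      simp [h, ih] <;> ring

theorem pv_items_counts (umbral : Int) (numeros : List Int) :
    ((numeros.map (fun n => if umbral ≤ n then "Alto" else "Bajo")).foldl
        (fun (d : PySem.Dict String Int) x => d.modify x 0 (· + 1))
        (PySem.Dict.ofList [("Alto", 0), ("Bajo", 0)])).items
      = [("Alto", ((numeros.map (fun n => if umbral ≤ n then "Alto" else "Bajo")).count "Alto" : Int)),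
         ("Bajo", ((numeros.map (fun n => if umbral ≤ n then "Alto" else "Bajo")).count "Bajo" : Int))] := by
  set L := numeros.map (fun n => if umbral ≤ n then "Alto" else "Bajo") with hL
  set D := L.foldl (fun (d : PySem.Dict String Int) x => d.modify x 0 (· + 1))
    (PySem.Dict.ofList [("Alto", 0), ("Bajo", 0)]) with hD
  have hkeys : D.keys = ["Alto", "Bajo"] := by
    rw [hD, PySem.Dict.keys_foldl_modify]
    have h0 : (PySem.Dict.ofList [("Alto", (0:Int)), ("Bajo", 0)]).keys = ["Alto", "Bajo"] := by decide
    rw [h0, PySem.Set.update_eq_append_filter]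
    have : (PySem.Set.ofList L).filter
        (fun y => !(PySem.Set.contains ["Alto", "Bajo"] y)) = [] := by
      rw [List.filter_eq_nil_iff]
      intro y hy
      have : y ∈ L := (PySem.Set.mem_ofList L y).1 hy
      rw [hL] at this
      obtain ⟨n, _, hn⟩ := List.mem_map.1 this
      by_cases h : umbral ≤ n <;> simp [h] at hn <;> simp [← hn]
    rw [this, List.append_nil]
  have hnodup : D.keys.Nodup := by rw [hkeys]; decide
  have hgetD : ∀ v, D.getD v 0
      = (PySem.Dict.ofList [("Alto", (0:Int)), ("Bajo", 0)]).getD v 0 + L.count v := by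
    intro v
    rw [hD, PySem.Dict.getD_foldl_modify_add_one]
  rw [PySem.Dict.items_eq_map_keys D hnodup 0, hkeys]
  simp only [List.map_cons, List.map_nil]
  rw [hgetD "Alto", hgetD "Bajo"]
  have hA : (PySem.Dict.ofList [("Alto", (0:Int)), ("Bajo", 0)]).getD "Alto" 0 = 0 := by decide
  have hB : (PySem.Dict.ofList [("Alto", (0:Int)), ("Bajo", 0)]).getD "Bajo" 0 = 0 := by decide
  rw [hA, hB]
  simp

-- ===== VERDICT (by name: the statement is the Claim_ definition above) =====
theorem clasificar_numeros_spec : Claim_equal_clasificar_numeros := by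
  intro numeros umbral _
  show clasificar_numeros numeros umbral = clasificar_numeros_alt numeros umbral
  unfold clasificar_numeros clasificar_numeros_alt
  rw [pv_foldl_split]
  simp only [List.nil_append]
  rw [pv_items_counts, pv_count_alto, pv_count_bajo]
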